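-- pv_equiv track=rewrite | github.com/KamalJerome/BajajFinserv | app.py | alternating_caps_reverse_concat
-- ===== SOURCE A (Python) =====
-- def alternating_caps_reverse_concat(alphabets):
--     concat_str = "".join(alphabets)
--     reversed_str = concat_str[::-1]
--
--     result = ""
--     for i, ch in enumerate(reversed_str):
--         if i % 2 == 0:
--             result += ch.upper()
--         else:
--             result += ch.lower()
--     return result
-- ===== SOURCE B (Python) =====
-- def alternating_caps_reverse_concat(alphabets):
--     # Different decomposition: consume the reversed string two characters at a
--     # time (no index, no parity test), collecting pieces and joining once.
--     reversed_str = "".join(alphabets)[::-1]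
--     it = iter(reversed_str)
--     out = []
--     for a in it:
--         out.append(a.upper())
--         b = next(it, None)
--         if b is None:
--             break
--         out.append(b.lower())
--     return "".join(out)
-- ===== Notes on version B (the rewrite author's own statement) =====
-- stated objective: alternative
-- what changed: Replaces the indexed parity-branching loop with string += by an index-free two-at-a-time consumption of an iterator (upper one char, lower the next), collecting pieces in a list joined once.
import Mathlib
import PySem

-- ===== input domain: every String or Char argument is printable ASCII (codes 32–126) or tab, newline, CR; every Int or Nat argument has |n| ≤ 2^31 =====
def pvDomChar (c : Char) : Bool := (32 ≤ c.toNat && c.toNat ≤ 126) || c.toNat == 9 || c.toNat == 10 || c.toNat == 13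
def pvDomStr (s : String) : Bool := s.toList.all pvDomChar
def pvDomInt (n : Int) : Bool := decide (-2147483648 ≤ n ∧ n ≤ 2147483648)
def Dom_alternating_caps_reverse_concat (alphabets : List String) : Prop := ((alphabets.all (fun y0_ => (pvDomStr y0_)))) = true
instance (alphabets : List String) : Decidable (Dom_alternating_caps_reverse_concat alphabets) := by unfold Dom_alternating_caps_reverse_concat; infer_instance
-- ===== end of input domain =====

-- B replaces A's indexed parity-branching loop by an index-free two-characters-at-a-time
-- recursion over the reversed string (objective: alternative decomposition, same cost).


-- ===== PORT A =====
def alternating_caps_reverse_concat (alphabets : List String) : String :=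
  let concat_str := PySem.Str.join "" alphabets
  -- s[::-1]: step -1 is never 0, so slice? always returns some; .getD "" is unreachable
  let reversed_str := (PySem.Str.slice? concat_str none none (-1)).getD ""
  (PySem.List.enumerate reversed_str.toList 0).foldl
    (fun result p =>
      if p.1 % 2 == 0 then result ++ PySem.Str.upper (String.singleton p.2)
      else result ++ PySem.Str.lower (String.singleton p.2)) ""

-- ===== PORT B =====
-- the two-at-a-time loop of Source B: append a.upper(), then b.lower() if a next char exists
def altCapsGo : List Char → List Char
  | [] => []
  | [a] => [PySem.Chars.upperChar a]
  | a :: b :: rest => PySem.Chars.upperChar a :: PySem.Chars.lowerChar b :: altCapsGo rest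

def alternating_caps_reverse_concat_alt (alphabets : List String) : String :=
  let reversed_str := (PySem.Str.slice? (PySem.Str.join "" alphabets) none none (-1)).getD ""
  String.ofList (altCapsGo reversed_str.toList)

-- ===== PRECONDITION & SPEC =====
def Spec_alternating_caps_reverse_concat (alphabets : List String) (out : String) : Prop := out = alternating_caps_reverse_concat_alt alphabets
instance (alphabets : List String) (out : String) : Decidable (Spec_alternating_caps_reverse_concat alphabets out) := by unfold Spec_alternating_caps_reverse_concat; infer_instance

-- ===== CLAIM (what is proved, stated in full; the proofs are below) =====
def Claim_equal_alternating_caps_reverse_concat : Prop := ∀ (alphabets : List String), Dom_alternating_caps_reverse_concat alphabets → Spec_alternating_caps_reverse_concat alphabets (alternating_caps_reverse_concat alphabets)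

-- ===== LEMMAS AND PROOFS =====
-- A's fold over enumerate, starting at an even index, produces exactly B's two-at-a-time list
theorem foldA_even (l : List Char) (s : Int) (acc : String) (hs : s % 2 = 0) :
    ((PySem.List.enumerate l s).foldl
      (fun result p =>
        if p.1 % 2 == 0 then result ++ PySem.Str.upper (String.singleton p.2)
        else result ++ PySem.Str.lower (String.singleton p.2)) acc).toList
    = acc.toList ++ altCapsGo l := by
  induction l using altCapsGo.induct generalizing s acc with
  | case1 => simp [PySem.List.enumerate_nil, altCapsGo]
  | case2 a =>
    have h1 : (2 : Int) ∣ s := by omega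
    simp [PySem.List.enumerate_cons, PySem.List.enumerate_nil, altCapsGo, h1,
      PySem.Str.upper, PySem.Chars.upper, String.singleton]
  | case3 a b rest ih =>
    have h1 : (s % 2 == 0) = true := by simpa using hs
    have h2 : ¬ ((s + 1) % 2 == 0) = true := by simp; omega
    have h3 : (s + 1 + 1) % 2 = 0 := by omega
    simp only [PySem.List.enumerate_cons, List.foldl_cons]
    rw [if_pos h1, if_neg h2, ih _ _ h3]
    simp [altCapsGo, PySem.Str.upper, PySem.Str.lower,
      PySem.Chars.upper, PySem.Chars.lower, String.singleton]

-- ===== VERDICT (by name: the statement is the Claim_ definition above) =====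
theorem alternating_caps_reverse_concat_spec : Claim_equal_alternating_caps_reverse_concat := by
  intro alphabets _
  unfold Spec_alternating_caps_reverse_concat
  unfold alternating_caps_reverse_concat alternating_caps_reverse_concat_alt
  apply String.toList_inj.mp
  rw [foldA_even _ 0 "" (by norm_num)]
  simp
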